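-- pv_equiv track=rewrite | github.com/evotools/CattleGraphGenomePaper | Assembly/ABS.py | seqGapsLegacy
-- ===== SOURCE A (Python) =====
-- def seqGapsLegacy(seq):
--     nGaps = 0
--     isGap = False
--     seq = list(seq)
--     for c in seq:
--         if c == "N":
--             isGap = True
--             continue
--         elif c != "N" and isGap:
--             nGaps += 1
--             isGap = False
--             continue
--         else:
--             continue
--     if isGap:
--         nGaps += 1
--     return nGaps
-- ===== SOURCE B (Python) =====
-- def seqGapsLegacy(seq):
--     # run-skipping scan: look at the first char of each maximal run, then skip the run
--     s = list(seq)
--     n = len(s)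
--     count = 0
--     i = 0
--     while i < n:
--         c = s[i]
--         if c == "N":
--             count += 1
--         i += 1
--         while i < n and s[i] == c:
--             i += 1
--     return count
-- ===== Notes on version B (the rewrite author's own statement) =====
-- stated objective: alternative
-- what changed: Replaces the per-character isGap flag state machine (with trailing flush) by a run-skipping scan that advances a whole maximal run at a time and counts runs whose first character is the gap letter.
import Mathlib
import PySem

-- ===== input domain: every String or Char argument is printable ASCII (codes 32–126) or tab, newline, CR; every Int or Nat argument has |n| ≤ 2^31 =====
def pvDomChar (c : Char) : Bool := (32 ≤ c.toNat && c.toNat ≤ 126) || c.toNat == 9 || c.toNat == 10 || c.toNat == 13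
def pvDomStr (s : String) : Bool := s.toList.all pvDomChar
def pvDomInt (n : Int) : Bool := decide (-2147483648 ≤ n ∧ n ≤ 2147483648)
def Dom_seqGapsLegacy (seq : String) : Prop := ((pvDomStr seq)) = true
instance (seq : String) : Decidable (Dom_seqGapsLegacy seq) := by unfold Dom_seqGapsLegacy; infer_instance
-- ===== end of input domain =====

-- B replaces A's per-character isGap state machine by a run-skipping scan; alternative, same cost.

-- ===== PORT A =====
-- literal transliteration of A's flag state machine with trailing flush
def seqGapsLegacyStep (p : Int × Bool) (c : Char) : Int × Bool :=
  if c == 'N' then (p.1, true)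
  else if c != 'N' && p.2 then (p.1 + 1, false)
  else p

def seqGapsLegacy (seq : String) : Int :=
  let st := seq.toList.foldl seqGapsLegacyStep (0, false)
  if st.2 then st.1 + 1 else st.1

-- ===== PORT B =====
-- B's outer while loop: count 1 for a run starting with 'N', then drop the whole run
def seqGapsLegacyAltGo : List Char → Int
  | [] => 0
  | c :: t =>
      (if c == 'N' then (1 : Int) else 0) + seqGapsLegacyAltGo (t.dropWhile (· == c))
termination_by l => l.length
decreasing_by
  simpa using Nat.lt_succ_of_le (List.length_dropWhile_le _ t)

def seqGapsLegacy_alt (seq : String) : Int := seqGapsLegacyAltGo seq.toList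

-- ===== PRECONDITION & SPEC =====
def Spec_seqGapsLegacy (seq : String) (out : Int) : Prop := out = seqGapsLegacy_alt seq
instance (seq : String) (out : Int) : Decidable (Spec_seqGapsLegacy seq out) := by unfold Spec_seqGapsLegacy; infer_instance

-- ===== CLAIM (what is proved, stated in full; the proofs are below) =====
def Claim_equal_seqGapsLegacy : Prop := ∀ (seq : String), Dom_seqGapsLegacy seq → Spec_seqGapsLegacy seq (seqGapsLegacy seq)

-- ===== LEMMAS AND PROOFS =====

def seqGapsLegacyFin (p : Int × Bool) : Int := if p.2 then p.1 + 1 else p.1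

-- leading copies of a non-'N' char are no-ops in state false
theorem foldl_drop_noop (t : List Char) (c : Char) (hc : (c == 'N') = false) (g : Int) :
    (t.dropWhile (· == c)).foldl seqGapsLegacyStep (g, false)
      = t.foldl seqGapsLegacyStep (g, false) := by
  induction t with
  | nil => simp
  | cons d t ih =>
    by_cases hd : (d == c) = true
    · have hdc : d = c := by simpa using hd
      have hdN : (d == 'N') = false := by subst hdc; exact hc
      simp [List.dropWhile, hd, List.foldl, seqGapsLegacyStep, hdN, ih]
    · simp [List.dropWhile, eq_false_of_ne_true hd]

theorem foldl_altGo (n : ℕ) : ∀ (l : List Char), l.length ≤ n → ∀ (g : Int),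
    seqGapsLegacyFin (l.foldl seqGapsLegacyStep (g, false)) = g + seqGapsLegacyAltGo l
    ∧ seqGapsLegacyFin (l.foldl seqGapsLegacyStep (g, true))
        = g + seqGapsLegacyAltGo ('N' :: l) := by
  induction n with
  | zero =>
    intro l hl g
    have : l = [] := List.length_eq_zero_iff.mp (Nat.le_zero.mp hl)
    subst this
    simp [seqGapsLegacyFin, seqGapsLegacyAltGo]
  | succ n ih =>
    intro l hl g
    cases l with
    | nil => simp [seqGapsLegacyFin, seqGapsLegacyAltGo]
    | cons c t =>
      have ht : t.length ≤ n := Nat.le_of_succ_le_succ hl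
      by_cases hc : (c == 'N') = true
      · have hcN : c = 'N' := by simpa using hc
        subst hcN
        constructor
        · rw [show seqGapsLegacyAltGo ('N' :: t)
              = 1 + seqGapsLegacyAltGo (t.dropWhile (· == 'N')) from by
              simp [seqGapsLegacyAltGo]]
          have := (ih t ht g).2
          simp only [List.foldl, seqGapsLegacyStep] at this ⊢
          simp only [BEq.rfl, if_true] at *
          rw [this]
          simp [seqGapsLegacyAltGo]
        · have := (ih t ht g).2
          simp only [List.foldl, seqGapsLegacyStep] at this ⊢
          simp only [BEq.rfl, if_true] at *
          rw [this]
          simp [seqGapsLegacyAltGo]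
      · have hc' : (c == 'N') = false := eq_false_of_ne_true hc
        have hdrop : (t.dropWhile (· == c)).length ≤ n :=
          le_trans (List.length_dropWhile_le _ t) ht
        constructor
        · have h1 := (ih (t.dropWhile (· == c)) hdrop g).1
          rw [foldl_drop_noop t c hc' g] at h1
          have hstep : seqGapsLegacyStep (g, false) c = (g, false) := by
            simp [seqGapsLegacyStep, hc']
          simp only [List.foldl, hstep]
          rw [show seqGapsLegacyAltGo (c :: t)
              = 0 + seqGapsLegacyAltGo (t.dropWhile (· == c)) from by
              simp [seqGapsLegacyAltGo, hc']]
          simpa using h1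
        · have h1 := (ih (t.dropWhile (· == c)) hdrop (g + 1)).1
          rw [foldl_drop_noop t c hc' (g + 1)] at h1
          simp only [List.foldl, seqGapsLegacyStep, hc', Bool.false_eq_true, if_false]
          rw [show seqGapsLegacyAltGo ('N' :: c :: t)
              = 1 + (0 + seqGapsLegacyAltGo (t.dropWhile (· == c))) from by
              rw [seqGapsLegacyAltGo]
              simp [List.dropWhile, hc', seqGapsLegacyAltGo]]
          have hcne : ¬ c = 'N' := by simpa using hc'
          simp [hcne]
          rw [h1]
          ring

-- ===== VERDICT (by name: the statement is the Claim_ definition above) =====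
theorem seqGapsLegacy_spec : Claim_equal_seqGapsLegacy := by
  intro seq _
  unfold Spec_seqGapsLegacy seqGapsLegacy seqGapsLegacy_alt
  have h := (foldl_altGo seq.toList.length seq.toList le_rfl 0).1
  simpa [seqGapsLegacyFin] using h
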